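-- pv_equiv track=rewrite | github.com/xuda1979/papers | ag-qec/simulation.py | runlen_histogram
-- ===== SOURCE A (Python) =====
-- from typing import List, Tuple
--
-- def runlen_histogram(states_all: List[int]) -> dict:
--     hist = {}
--     if not states_all:
--         return hist
--     run = 1
--     for i in range(1, len(states_all)):
--         if states_all[i] == states_all[i-1]:
--             run += 1
--         else:
--             hist[run] = hist.get(run, 0) + 1
--             run = 1
--     hist[run] = hist.get(run, 0) + 1
--     return hist
-- ===== SOURCE B (Python) =====
-- def runlen_histogram(states_all):
--     n = len(states_all)
--     if n == 0:
--         return {}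
--     cuts = [0] + [i for i in range(1, n) if states_all[i] != states_all[i - 1]] + [n]
--     hist = {}
--     for a, b in zip(cuts, cuts[1:]):
--         hist[b - a] = hist.get(b - a, 0) + 1
--     return hist
-- ===== Notes on version B (the rewrite author's own statement) =====
-- stated objective: alternative
-- what changed: B computes the list of change positions (indices i with states_all[i] != states_all[i-1]), pads it with 0 and n into a cut-position list, and tallies the pairwise differences of consecutive cuts into the dict, instead of A's single interleaved run-counter-and-dict-update loop.
import Mathlib
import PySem

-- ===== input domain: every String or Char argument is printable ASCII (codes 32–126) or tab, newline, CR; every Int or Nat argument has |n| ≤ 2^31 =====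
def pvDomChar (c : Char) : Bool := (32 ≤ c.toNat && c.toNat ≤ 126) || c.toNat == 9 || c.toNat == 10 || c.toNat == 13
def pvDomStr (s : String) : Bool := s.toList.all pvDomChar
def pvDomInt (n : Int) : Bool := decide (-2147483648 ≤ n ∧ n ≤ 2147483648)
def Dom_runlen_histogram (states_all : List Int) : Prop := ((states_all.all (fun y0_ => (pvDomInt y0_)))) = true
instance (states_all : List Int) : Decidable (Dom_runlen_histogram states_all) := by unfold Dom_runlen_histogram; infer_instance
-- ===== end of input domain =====

-- B lists the boundary positions where the value changes, pads them with 0 and n, and tallies the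
-- pairwise differences of consecutive cut positions, instead of A's interleaved run-counter loop;
-- same O(n) cost, a different decomposition (objective: alternative).

-- ===== PORT A =====
-- A's for-loop over i in range(1, len): state (hist, run), comparing each element with the previous one.
def pvLoopA (hist : PySem.Dict Int Int) (run : Int) (prev : Int) : List Int → PySem.Dict Int Int × Int
  | [] => (hist, run)
  | y :: t =>
    if y == prev then pvLoopA hist (run + 1) y t
    else pvLoopA (hist.insert run (hist.getD run 0 + 1)) 1 y t

def runlen_histogram (states_all : List Int) : List (Int × Int) :=
  match states_all with
  | [] => []
  | x :: rest =>
    let st := pvLoopA PySem.Dict.empty 1 x rest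
    (st.1.insert st.2 (st.1.getD st.2 0 + 1)).items

-- ===== PORT B =====
-- cuts = [0] + [i for i in range(1, n) if states_all[i] != states_all[i-1]] + [n];
-- then the histogram of b - a over zip(cuts, cuts[1:]).
def runlen_histogram_alt (states_all : List Int) : List (Int × Int) :=
  let n : Int := states_all.length
  if n == 0 then []
  else
    let cuts : List Int :=
      ((0 : Int) :: (PySem.List.pyRange 1 n 1).filter
        (fun i => !(PySem.List.pyGet? states_all i == PySem.List.pyGet? states_all (i - 1)))) ++ [n]
    ((cuts.zip cuts.tail).foldl
        (fun d p => d.insert (p.2 - p.1) (d.getD (p.2 - p.1) 0 + 1)) PySem.Dict.empty).items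

-- ===== PRECONDITION & SPEC =====
def Spec_runlen_histogram (states_all : List Int) (out : List (Int × Int)) : Prop := out = runlen_histogram_alt states_all
instance (states_all : List Int) (out : List (Int × Int)) : Decidable (Spec_runlen_histogram states_all out) := by unfold Spec_runlen_histogram; infer_instance

-- ===== CLAIM (what is proved, stated in full; the proofs are below) =====
def Claim_equal_runlen_histogram : Prop := ∀ (states_all : List Int), Dom_runlen_histogram states_all → Spec_runlen_histogram states_all (runlen_histogram states_all)

-- ===== LEMMAS AND PROOFS =====

-- counting step shared by both histograms
def pvStep (d : PySem.Dict Int Int) (v : Int) : PySem.Dict Int Int := d.insert v (d.getD v 0 + 1)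

-- run lengths of a sequence whose current run has value x counted r times so far
def pvRL (x : Int) (r : Int) : List Int → List Int
  | [] => [r]
  | y :: t => if y == x then pvRL y (r + 1) t else r :: pvRL y 1 t

-- consecutive differences
def pvDif : List Int → List Int
  | [] => []
  | [_] => []
  | a :: b :: t => (b - a) :: pvDif (b :: t)

-- B's change-position list
def pvChg (xs : List Int) : List Int :=
  (PySem.List.pyRange 1 (xs.length : Int) 1).filter
    (fun i => !(PySem.List.pyGet? xs i == PySem.List.pyGet? xs (i - 1)))

-- A's loop followed by the final 'hist[run] += 1' tallies exactly the run lengths pvRL x r t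
theorem pvLoopA_eq (t : List Int) : ∀ (x r : Int) (h : PySem.Dict Int Int),
    (pvLoopA h r x t).1.insert (pvLoopA h r x t).2
        ((pvLoopA h r x t).1.getD (pvLoopA h r x t).2 0 + 1)
      = (pvRL x r t).foldl pvStep h := by
  induction t with
  | nil => intro x r h; simp [pvLoopA, pvRL, pvStep]
  | cons y t ih =>
    intro x r h
    by_cases hy : y = x
    · simp [pvLoopA, pvRL, hy, ih]
    · simp [pvLoopA, pvRL, hy, ih, pvStep]

theorem pvDif_eq_zip (l : List Int) :
    pvDif l = (l.zip l.tail).map (fun p => p.2 - p.1) := by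
  match l with
  | [] => rfl
  | [_] => rfl
  | a :: b :: t => simp [pvDif, pvDif_eq_zip (b :: t)]

-- consecutive differences are invariant under shifting all positions
theorem pvDif_shift (l : List Int) (s : Int) :
    pvDif (l.map (fun v => v + s)) = pvDif l := by
  match l with
  | [] => rfl
  | [_] => rfl
  | a :: b :: t =>
    have h1 : pvDif ((a :: b :: t).map (fun v => v + s))
        = ((b + s) - (a + s)) :: pvDif ((b :: t).map (fun v => v + s)) := rfl
    rw [h1, pvDif_shift (b :: t) s, show (b + s) - (a + s) = b - a by ring]; rfl

-- index-shift lemma for pyGet? on a cons, nonnegative index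
theorem pvGet_cons_succ (x : Int) (xs : List Int) (i : Int) (h : 0 ≤ i) :
    PySem.List.pyGet? (x :: xs) (i + 1) = PySem.List.pyGet? xs i := by
  rw [PySem.List.pyGet?_of_nonneg (x :: xs) (show (0:Int) ≤ i + 1 by omega),
    PySem.List.pyGet?_of_nonneg xs h]
  have : (i + 1).toNat = i.toNat + 1 := by omega
  rw [this]
  simp

-- recursive characterization of the change-position list
theorem pvChg_shift (y z : Int) (t : List Int) :
    pvChg (y :: z :: t) =
      (if z == y then [] else [1]) ++ (pvChg (z :: t)).map (fun v => v + 1) := by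
  unfold pvChg
  have hn : ((y :: z :: t).length : Int) = (t.length : Int) + 2 := by simp; omega
  have hm : (((z :: t).length) : Int) = (t.length : Int) + 1 := by simp
  rw [hn, hm]
  rw [PySem.List.pyRange_one_cons (by omega : (1:Int) < (t.length : Int) + 2)]
  have hshift : PySem.List.pyRange 2 ((t.length : Int) + 2) 1
      = (PySem.List.pyRange 1 ((t.length : Int) + 1) 1).map (fun v => v + 1) := by
    rw [PySem.List.pyRange_one, PySem.List.pyRange_one, List.map_map]
    have : ((t.length : Int) + 2 - 2).toNat = ((t.length : Int) + 1 - 1).toNat := by omega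
    rw [this]
    apply List.map_congr_left
    intro k _
    simp; ring
  rw [show (1:Int) + 1 = 2 from rfl, hshift]
  rw [List.filter_cons]
  have h1 : (!(PySem.List.pyGet? (y :: z :: t) 1 == PySem.List.pyGet? (y :: z :: t) (1 - 1))) = !(z == y) := by
    have h0 := pvGet_cons_succ y (z :: t) 0 le_rfl
    rw [show (0:Int) + 1 = 1 from rfl] at h0
    rw [h0, show (1:Int) - 1 = 0 from rfl, PySem.List.pyGet?_zero_cons, PySem.List.pyGet?_zero_cons]
    simp
  rw [h1]
  rw [List.filter_map]
  have h2 : ((PySem.List.pyRange 1 ((t.length : Int) + 1) 1).filter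
      ((fun i => !(PySem.List.pyGet? (y :: z :: t) i == PySem.List.pyGet? (y :: z :: t) (i - 1))) ∘ (fun v => v + 1)))
      = (PySem.List.pyRange 1 ((t.length : Int) + 1) 1).filter
        (fun i => !(PySem.List.pyGet? (z :: t) i == PySem.List.pyGet? (z :: t) (i - 1))) := by
    apply List.filter_congr
    intro i hi
    have hi' := (PySem.List.mem_pyRange_one).mp hi
    simp only [Function.comp]
    have e1 : PySem.List.pyGet? (y :: z :: t) (i + 1) = PySem.List.pyGet? (z :: t) i :=
      pvGet_cons_succ y (z :: t) i (by omega)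
    have e2 : PySem.List.pyGet? (y :: z :: t) (i + 1 - 1) = PySem.List.pyGet? (z :: t) (i - 1) := by
      have : i + 1 - 1 = (i - 1) + 1 := by ring
      rw [this]
      exact pvGet_cons_succ y (z :: t) (i - 1) (by omega)
    rw [e1, e2]
  rw [h2]
  by_cases hzy : z = y
  · simp [hzy]
  · simp [hzy]

theorem pvChg_nil_single (y : Int) : pvChg [y] = [] := by
  unfold pvChg
  rw [show (([y] : List Int).length : Int) = 1 by rfl, PySem.List.pyRange_one_eq_nil le_rfl]
  rfl

-- the pairwise differences of 0 :: changes ++ [n] are exactly the run lengths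
theorem pvMain (t : List Int) : ∀ (y r : Int),
    pvDif (((1 - r) :: pvChg (y :: t)) ++ [((y :: t).length : Int)]) = pvRL y r t := by
  induction t with
  | nil =>
    intro y r
    rw [pvChg_nil_single]
    show pvDif [1 - r, 1] = pvRL y r []
    rw [show pvDif [1 - r, 1] = [1 - (1 - r)] from rfl, show (1 : Int) - (1 - r) = r by ring]
    rfl
  | cons z t' ih =>
    intro y r
    rw [pvChg_shift y z t']
    have hlen : ((y :: z :: t').length : Int) = (t'.length : Int) + 2 := by
      simp [List.length_cons]; omega
    rw [hlen]
    by_cases hzy : z = y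
    · subst hzy
      have hlen' : ((z :: t').length : Int) = (t'.length : Int) + 1 := by
        simp [List.length_cons]
      simp only [beq_self_eq_true, if_true, List.nil_append]
      rw [show (1 : Int) - r = -r + 1 by ring]
      have hmap : (((-r) + 1) :: (pvChg (z :: t')).map (fun v => v + 1)) ++ [(t'.length : Int) + 2]
          = (((-r) :: pvChg (z :: t')) ++ [(t'.length : Int) + 1]).map (fun v => v + 1) := by
        simp [List.map_append]; omega
      rw [hmap, pvDif_shift]
      have h3 := ih z (r + 1)
      rw [hlen', show (1 : Int) - (r + 1) = -r by ring] at h3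
      rw [h3]
      simp [pvRL]
    · have hlen' : ((z :: t').length : Int) = (t'.length : Int) + 1 := by
        simp [List.length_cons]
      simp only [show (z == y) = false from beq_eq_false_iff_ne.mpr hzy, Bool.false_eq_true,
        if_false]
      rw [show (1 - r) :: ([1] ++ (pvChg (z :: t')).map (fun v => v + 1)) ++ [(t'.length : Int) + 2]
          = (1 - r) :: 1 :: ((pvChg (z :: t')).map (fun v => v + 1) ++ [(t'.length : Int) + 2]) by simp]
      rw [show pvDif ((1 - r) :: 1 :: ((pvChg (z :: t')).map (fun v => v + 1) ++ [(t'.length : Int) + 2]))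
          = (1 - (1 - r)) :: pvDif (1 :: ((pvChg (z :: t')).map (fun v => v + 1) ++ [(t'.length : Int) + 2])) from rfl]
      have hmap : (1 : Int) :: ((pvChg (z :: t')).map (fun v => v + 1) ++ [(t'.length : Int) + 2])
          = (((0 : Int) :: pvChg (z :: t')) ++ [(t'.length : Int) + 1]).map (fun v => v + 1) := by
        simp [List.map_append]; omega
      rw [hmap, pvDif_shift]
      have h3 := ih z 1
      rw [hlen', show (1 : Int) - 1 = 0 by ring] at h3
      rw [h3, show (1 : Int) - (1 - r) = r by ring]
      simp [pvRL, hzy]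

-- B's fold over zipped cut pairs is the fold of pvStep over the difference list
theorem pvFold_zip (l : List Int) (e : PySem.Dict Int Int) :
    (l.zip l.tail).foldl (fun d p => d.insert (p.2 - p.1) (d.getD (p.2 - p.1) 0 + 1)) e
      = (pvDif l).foldl pvStep e := by
  rw [pvDif_eq_zip, List.foldl_map]; rfl

-- ===== VERDICT (by name: the statement is the Claim_ definition above) =====
theorem runlen_histogram_spec : Claim_equal_runlen_histogram := by
  intro xs _
  unfold Spec_runlen_histogram
  match xs with
  | [] => rfl
  | x :: rest =>
    have hA : runlen_histogram (x :: rest)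
        = ((pvRL x 1 rest).foldl pvStep PySem.Dict.empty).items := by
      show ((pvLoopA PySem.Dict.empty 1 x rest).1.insert (pvLoopA PySem.Dict.empty 1 x rest).2
          ((pvLoopA PySem.Dict.empty 1 x rest).1.getD (pvLoopA PySem.Dict.empty 1 x rest).2 0 + 1)).items
        = ((pvRL x 1 rest).foldl pvStep PySem.Dict.empty).items
      rw [pvLoopA_eq rest x 1 PySem.Dict.empty]
    have hB : runlen_histogram_alt (x :: rest)
        = ((pvRL x 1 rest).foldl pvStep PySem.Dict.empty).items := by
      unfold runlen_histogram_alt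
      have hc : ((((x :: rest).length : Int)) == 0) = false := by simp; omega
      simp only [hc, Bool.false_eq_true, if_false]
      rw [pvFold_zip]
      have hcuts : ((0 : Int) :: (PySem.List.pyRange 1 ((x :: rest).length : Int) 1).filter
            (fun i => !(PySem.List.pyGet? (x :: rest) i == PySem.List.pyGet? (x :: rest) (i - 1)))) ++ [((x :: rest).length : Int)]
          = ((1 - 1 : Int) :: pvChg (x :: rest)) ++ [((x :: rest).length : Int)] := rfl
      rw [hcuts, pvMain rest x 1]
    rw [hA, hB]
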